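-- pv_equiv track=rewrite | github.com/xenophorus/vlad_weather | src/WeatherData.py | _weather_by_code
-- ===== SOURCE A (Python) =====
-- def _weather_by_code(code: int) -> int:
--     weather = {1: (1, 2), #ясно
--                3: (22, 19, 10), #облачно
--                4: (33, 23), #слабый дождь
--                5: (31,), #дождь
--                6: (25,), #сильный дождь
--                7: (34, 24), #слабый снег
--                8: (32,), #снег
--                9: (29, 26,), #сильный снег
--                10: (30, 28, 27,), #гроза
--                11: (35,), #смешанные осадки
--                # 2: "переменная облачность",
--                }
--     for k, v in weather.items():
--         if code in v:
--             return k
--     return 2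
-- ===== SOURCE B (Python) =====
-- # B: arithmetic/dense-table dispatch: two small special cases, then a contiguous
-- # table indexed by code-23 (codes 23..35 are a dense block), default 2.
-- _BLOCK = (4, 7, 6, 9, 10, 10, 9, 10, 5, 8, 4, 7, 11)  # categories for codes 23..35
--
--
-- def _weather_by_code(code: int) -> int:
--     if code == 1 or code == 2:
--         return 1
--     if code == 10 or code == 19 or code == 22:
--         return 3
--     if 23 <= code <= 35:
--         return _BLOCK[code - 23]
--     return 2
-- ===== Notes on version B (the rewrite author's own statement) =====
-- stated objective: alternative
-- what changed: Replaces A's scan over a category->codes dict with tuple-membership tests by arithmetic dispatch: the dense code block is resolved by direct offset indexing into a flat contiguous table, the few non-contiguous codes by two explicit equality tests, and everything else falls through to the default category.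
import Mathlib
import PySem

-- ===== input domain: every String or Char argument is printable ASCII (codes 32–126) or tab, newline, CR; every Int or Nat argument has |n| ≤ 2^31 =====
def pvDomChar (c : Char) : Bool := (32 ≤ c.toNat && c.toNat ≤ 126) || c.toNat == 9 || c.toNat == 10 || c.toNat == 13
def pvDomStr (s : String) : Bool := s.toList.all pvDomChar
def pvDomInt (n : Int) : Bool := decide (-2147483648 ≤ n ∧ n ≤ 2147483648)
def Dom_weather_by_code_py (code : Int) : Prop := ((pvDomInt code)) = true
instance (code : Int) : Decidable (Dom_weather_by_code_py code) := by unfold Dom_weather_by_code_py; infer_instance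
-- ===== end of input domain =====

-- B replaces A's scan over the category table by arithmetic dispatch: two equality tests plus
-- offset indexing into a dense table for the contiguous code block 23..35 (alternative, not faster).

-- ===== PORT A =====
-- the literal category → codes table (the dict's items in insertion order)
def pvWeatherTableA : List (Int × List Int) :=
  [(1, [1, 2]), (3, [22, 19, 10]), (4, [33, 23]), (5, [31]), (6, [25]),
   (7, [34, 24]), (8, [32]), (9, [29, 26]), (10, [30, 28, 27]), (11, [35])]

-- 'for k, v in weather.items(): if code in v: return k' / 'return 2'
def pvScanA (code : Int) : List (Int × List Int) → Int
  | [] => 2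
  | (k, v) :: rest => if code ∈ v then k else pvScanA code rest

def weather_by_code_py (code : Int) : Int := pvScanA code pvWeatherTableA

-- ===== PORT B =====
-- _BLOCK: categories for the dense code block 23..35
def pvBlockB : List Int := [4, 7, 6, 9, 10, 10, 9, 10, 5, 8, 4, 7, 11]

def weather_by_code_py_alt (code : Int) : Int :=
  if code = 1 ∨ code = 2 then 1
  else if code = 10 ∨ code = 19 ∨ code = 22 then 3
  else if 23 ≤ code ∧ code ≤ 35 then
    -- _BLOCK[code - 23]: the guard guarantees 0 ≤ code - 23 < 13, so indexing never raises
    PySem.List.pyGetD pvBlockB (code - 23) 2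
  else 2

-- ===== PRECONDITION & SPEC =====
def Spec_weather_by_code_py (code : Int) (out : Int) : Prop := out = weather_by_code_py_alt code
instance (code : Int) (out : Int) : Decidable (Spec_weather_by_code_py code out) := by unfold Spec_weather_by_code_py; infer_instance

-- ===== CLAIM =====
def Claim_equal_weather_by_code_py : Prop := ∀ (code : Int), Dom_weather_by_code_py code → Spec_weather_by_code_py code (weather_by_code_py code)

-- ===== LEMMAS AND PROOFS =====
theorem weather_by_code_py_spec : Claim_equal_weather_by_code_py := by
  intro code _
  unfold Spec_weather_by_code_py weather_by_code_py weather_by_code_py_alt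
  by_cases h : code ∈ ([1, 2, 10, 19, 22, 23, 24, 25, 26, 27, 28, 29, 30, 31, 32, 33, 34, 35] : List Int)
  · fin_cases h <;> decide
  · simp only [List.mem_cons, List.not_mem_nil, or_false, not_or] at h
    obtain ⟨h1, h2, h3, h4, h5, h6, h7, h8, h9, h10, h11, h12, h13, h14, h15, h16, h17, h18⟩ := h
    have hA : pvScanA code pvWeatherTableA = 2 := by
      simp [pvWeatherTableA, pvScanA, h1, h2, h3, h4, h5, h6, h7, h8, h9, h10, h11, h12,
        h13, h14, h15, h16, h17, h18]
    rw [hA]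
    have hrange : ¬ (23 ≤ code ∧ code ≤ 35) := by omega
    simp [h1, h2, h3, h4, h5, hrange]
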